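-- pv_equiv track=rewrite | github.com/wattaihei/ProgrammingContest | Codeforces/CR553/probC.py | solve
-- ===== SOURCE A (Python) =====
-- mod = 10**9+7
--
-- def solve(x):
--     if x == 0: return 0
--     for K in range(100):
--         if 2**K <= x < 2**(K+1):
--             break
--     score = 0
--     if K%2 == 0:
--         last1 = 1
--         for n in range(K//2):
--             last1 += 2*2**(2*n)
--         last1 += 2*(x-2**K)
--
--         last2 = 0
--         for n in range(K//2):
--             last2 += 2*2**(2*n+1)
--
--     else:
--         last2 = 2
--         for n in range(K//2):
--             last2 += 2*2**(2*n+1)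
--         last2 += 2*(x-2**K)
--
--         last1 = -1
--         for n in range(K//2+1):
--             last1 += 2*2**(2*n)
--     score = ((last1+1)**2//4) % mod + ((last2+2)*last2//4) % mod
--     score %= mod
--
--     return score
-- ===== SOURCE B (Python) =====
-- mod = 10**9+7
--
-- def solve(x):
--     if x == 0:
--         return 0
--     K = x.bit_length() - 1
--     m = K // 2
--     if K % 2 == 0:
--         last1 = 1 + 2 * ((4**m - 1) // 3) + 2 * (x - 2**K)
--         last2 = 4 * ((4**m - 1) // 3)
--     else:
--         last2 = 2 + 4 * ((4**m - 1) // 3) + 2 * (x - 2**K)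
--         last1 = -1 + 2 * ((4**(m+1) - 1) // 3)
--     return (((last1+1)**2 // 4) % mod + ((last2+2)*last2 // 4) % mod) % mod
-- ===== Notes on version B (the rewrite author's own statement) =====
-- stated objective: simpler
-- what changed: B replaces A's linear scan for K (range with a break) by bit_length, and replaces both summation loops by the closed-form value of their geometric sums computed with one exact integer division, keeping the identical final scoring expression.
-- outside the precondition, e.g. on solve(-1): A returns 335835431, B returns 1
import Mathlib
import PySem

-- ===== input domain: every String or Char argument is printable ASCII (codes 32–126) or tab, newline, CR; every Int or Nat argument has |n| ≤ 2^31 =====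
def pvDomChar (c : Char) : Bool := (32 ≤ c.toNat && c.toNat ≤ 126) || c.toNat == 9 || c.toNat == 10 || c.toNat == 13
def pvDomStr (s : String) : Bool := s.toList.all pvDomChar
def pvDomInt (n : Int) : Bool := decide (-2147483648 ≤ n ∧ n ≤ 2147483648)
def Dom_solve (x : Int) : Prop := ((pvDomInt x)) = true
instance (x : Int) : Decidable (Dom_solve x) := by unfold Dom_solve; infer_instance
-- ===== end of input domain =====

-- B replaces A's linear K-scan and two summation loops by bit_length and the
-- closed-form values of the geometric sums (objective: simpler).

-- ===== PORT A =====
-- the `for K in range(100): if …: break` scan; K is left at 99 if no K matches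
def solveFindK (x : Int) : Nat :=
  (((List.range 100).find? (fun K => decide ((2:Int)^K ≤ x ∧ x < 2^(K+1)))).getD 99)

def solve (x : Int) : Int :=
  if x = 0 then 0 else
  let K := solveFindK x
  if K % 2 = 0 then
    let last1 := (List.range (K/2)).foldl (fun s n => s + 2*2^(2*n)) 1
    let last1 := last1 + 2*(x - 2^K)
    let last2 := (List.range (K/2)).foldl (fun s n => s + 2*2^(2*n+1)) 0
    PySem.Int.mod (PySem.Int.mod (PySem.Int.floordiv ((last1+1)^2) 4) 1000000007
      + PySem.Int.mod (PySem.Int.floordiv ((last2+2)*last2) 4) 1000000007) 1000000007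
  else
    let last2 := (List.range (K/2)).foldl (fun s n => s + 2*2^(2*n+1)) 2
    let last2 := last2 + 2*(x - 2^K)
    let last1 := (List.range (K/2+1)).foldl (fun s n => s + 2*2^(2*n)) (-1)
    PySem.Int.mod (PySem.Int.mod (PySem.Int.floordiv ((last1+1)^2) 4) 1000000007
      + PySem.Int.mod (PySem.Int.floordiv ((last2+2)*last2) 4) 1000000007) 1000000007

-- ===== PORT B =====
def solve_alt (x : Int) : Int :=
  if x = 0 then 0 else
  let K := PySem.Int.bitLength x - 1
  let m := K / 2
  if K % 2 = 0 then
    let last1 := 1 + 2 * PySem.Int.floordiv (4^m - 1) 3 + 2*(x - 2^K)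
    let last2 := 4 * PySem.Int.floordiv (4^m - 1) 3
    PySem.Int.mod (PySem.Int.mod (PySem.Int.floordiv ((last1+1)^2) 4) 1000000007
      + PySem.Int.mod (PySem.Int.floordiv ((last2+2)*last2) 4) 1000000007) 1000000007
  else
    let last2 := 2 + 4 * PySem.Int.floordiv (4^m - 1) 3 + 2*(x - 2^K)
    let last1 := -1 + 2 * PySem.Int.floordiv (4^(m+1) - 1) 3
    PySem.Int.mod (PySem.Int.mod (PySem.Int.floordiv ((last1+1)^2) 4) 1000000007
      + PySem.Int.mod (PySem.Int.floordiv ((last2+2)*last2) 4) 1000000007) 1000000007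

-- ===== PRECONDITION & SPEC =====
-- Pre_ excludes negative x, outside this contest task's natural domain (x ≥ 0):
-- there A's K-scan never matches and its answer comes from the leftover loop value K = 99.
def Pre_solve (x : Int) : Prop := 0 ≤ x
instance (x : Int) : Decidable (Pre_solve x) := by unfold Pre_solve; infer_instance
def pvWitness_solve : Int := (5)
def Spec_solve (x : Int) (out : Int) : Prop := out = solve_alt x
instance (x : Int) (out : Int) : Decidable (Spec_solve x out) := by unfold Spec_solve; infer_instance

-- ===== CLAIM (what is proved, stated in full; the proofs are below) =====
def Claim_equal_solve : Prop := ∀ (x : Int), Dom_solve x → Pre_solve x → Spec_solve x (solve x)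

-- ===== LEMMAS AND PROOFS =====

/-- partial geometric sum ∑_{n<m} 4^n, as the loops accumulate it -/
def gsum (m : Nat) : Int := (List.range m).foldl (fun s n => s + 4^n) 0

lemma gsum_succ (m : Nat) : gsum (m+1) = gsum m + 4^m := by
  simp [gsum, List.range_succ]

lemma fold1 (m : Nat) (c : Int) :
    (List.range m).foldl (fun s n => s + 2*2^(2*n)) c = c + 2 * gsum m := by
  induction m with
  | zero => simp [gsum]
  | succ k ih =>
    rw [List.range_succ, List.foldl_append, ih, gsum_succ]
    simp [pow_mul]
    ring

lemma fold2 (m : Nat) (c : Int) :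
    (List.range m).foldl (fun s n => s + 2*2^(2*n+1)) c = c + 4 * gsum m := by
  induction m with
  | zero => simp [gsum]
  | succ k ih =>
    rw [List.range_succ, List.foldl_append, ih, gsum_succ]
    simp [pow_succ, pow_mul]
    ring

lemma gsum3 (m : Nat) : 3 * gsum m = 4^m - 1 := by
  induction m with
  | zero => simp [gsum]
  | succ k ih => rw [gsum_succ]; rw [pow_succ]; omega

lemma fdiv_gsum (m : Nat) : PySem.Int.floordiv (4^m - 1) 3 = gsum m := by
  rw [← gsum3, PySem.Int.floordiv_eq_ediv_of_pos (by norm_num)]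
  exact Int.mul_ediv_cancel_left _ (by norm_num)

lemma find?_range_first {p : Nat → Bool} {K N : Nat} (hKN : K < N) (hK : p K = true)
    (h : ∀ j, j < K → p j = false) : (List.range N).find? p = some K := by
  have hsplit : List.range N = List.range (K+1) ++ (List.range (N-(K+1))).map (fun j => (K+1) + j) := by
    rw [← List.range_add]; congr 1; omega
  rw [hsplit, List.find?_append]
  have h1 : (List.range (K+1)).find? p = some K := by
    rw [List.range_succ, List.find?_append]
    have h0 : (List.range K).find? p = none :=
      List.find?_eq_none.mpr (fun j hj => by simp [h j (List.mem_range.mp hj)])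
    simp [h0, hK]
  simp [h1]

lemma findK_eq (x : Int) (hx : 1 ≤ x) (hx2 : x ≤ 2^31) :
    solveFindK x = PySem.Int.bitLength x - 1 := by
  set K := PySem.Int.bitLength x - 1 with hKdef
  have hxne : x ≠ 0 := by omega
  have hbl1 : 1 ≤ PySem.Int.bitLength x := by
    by_contra hc
    have h0 : PySem.Int.bitLength x = 0 := by omega
    have := PySem.Int.lt_two_pow_bitLength x
    rw [h0] at this
    simp at this
    omega
  have hnat : (x.natAbs : Int) = x := Int.natAbs_of_nonneg (by omega)
  have hlo : (2:Int)^K ≤ x := by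
    have := PySem.Int.two_pow_bitLength_le x hxne
    calc (2:Int)^K = ((2^K : Nat) : Int) := by push_cast; ring
    _ ≤ (x.natAbs : Int) := by exact_mod_cast this
    _ = x := hnat
  have hhi : x < (2:Int)^(K+1) := by
    have := PySem.Int.lt_two_pow_bitLength x
    have hKp : K + 1 = PySem.Int.bitLength x := by omega
    calc x = (x.natAbs : Int) := hnat.symm
    _ < ((2^(PySem.Int.bitLength x) : Nat) : Int) := by exact_mod_cast this
    _ = (2:Int)^(K+1) := by rw [hKp]; push_cast; ring
  have hK31 : K < 100 := by
    by_contra hc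
    have : (2:Int)^100 ≤ 2^K := by
      apply pow_le_pow_right₀ (by norm_num) (by omega)
    have h100 : (2:Int)^31 < 2^100 := by norm_num
    omega
  unfold solveFindK
  rw [find?_range_first hK31 (by simp; exact ⟨hlo, hhi⟩)
    (fun j hj => by
      simp only [decide_eq_false_iff_not, not_and, not_lt]
      intro _
      calc (2:Int)^(j+1) ≤ 2^K := pow_le_pow_right₀ (by norm_num) (by omega)
      _ ≤ x := hlo)]
  rfl

-- ===== VERDICT (by name: the statement is the Claim_ definition above) =====
theorem solve_spec : Claim_equal_solve := by
  intro x hdom hpre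
  unfold Spec_solve
  by_cases hx0 : x = 0
  · simp [solve, solve_alt, hx0]
  · have hx1 : 1 ≤ x := by unfold Pre_solve at hpre; omega
    have hx2 : x ≤ 2^31 := by
      unfold Dom_solve pvDomInt at hdom
      simp at hdom
      omega
    have hfk := findK_eq x hx1 hx2
    unfold solve solve_alt
    rw [if_neg hx0, if_neg hx0, hfk]
    set K := PySem.Int.bitLength x - 1 with hKdef
    by_cases hpar : K % 2 = 0
    · rw [if_pos hpar, if_pos hpar]
      rw [fold1, fold2, fdiv_gsum]
      ring_nf
    · rw [if_neg hpar, if_neg hpar]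
      rw [fold1, fold2, fdiv_gsum, fdiv_gsum]
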